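-- pv_equiv track=rewrite | github.com/26point2Newms/interview-coding-questions | python/printDuplicateCharacters.py | findDuplicateCharsWithCount
-- ===== SOURCE A (Python) =====
-- def findDuplicateCharsWithCount(srcStr):
--     dupCharsList = []
--     charsRead = []
--     charsReadDict = {}  # Dictionary for keeping the duplicate character and the number of times we've seen it
--
--     for c in srcStr:
--         # Look in the characters we've read list and add it to our dup list if it's not already in there
--         if c in charsRead and len(charsRead) > 0:
--             if not c in dupCharsList:
--                 dupCharsList.append(c)
--                 # set it's count to 2 because this is the 2nd time we've read that character
--                 charsReadDict[c] = 2
--             else: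
--                 charsReadDict[c] = charsReadDict[c] + 1
--         else:
--             charsRead.append(c)
--
--     return charsReadDict
-- ===== SOURCE B (Python) =====
-- def findDuplicateCharsWithCount(srcStr):
--     # Pass 1: full frequency table of every character
--     counts = {}
--     for c in srcStr:
--         counts[c] = counts.get(c, 0) + 1
--     # Pass 2: keep only repeated characters, mapped to their full count
--     result = {}
--     seen = set()
--     for c in srcStr:
--         if c in seen:
--             result[c] = counts[c]
--         else:
--             seen.add(c)
--     return result
-- ===== Notes on version B (the rewrite author's own statement) =====
-- stated objective: alternative
-- what changed: A builds the duplicate dict in one pass, maintaining a seen-list (scanned by membership on every character), a duplicate-list and a running count that it increments as it goes; B first builds a complete frequency table of all characters in one counting pass and then, in a separate second pass, filters out the repeated characters, assigning each its final full count directly from the table.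
import Mathlib
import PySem

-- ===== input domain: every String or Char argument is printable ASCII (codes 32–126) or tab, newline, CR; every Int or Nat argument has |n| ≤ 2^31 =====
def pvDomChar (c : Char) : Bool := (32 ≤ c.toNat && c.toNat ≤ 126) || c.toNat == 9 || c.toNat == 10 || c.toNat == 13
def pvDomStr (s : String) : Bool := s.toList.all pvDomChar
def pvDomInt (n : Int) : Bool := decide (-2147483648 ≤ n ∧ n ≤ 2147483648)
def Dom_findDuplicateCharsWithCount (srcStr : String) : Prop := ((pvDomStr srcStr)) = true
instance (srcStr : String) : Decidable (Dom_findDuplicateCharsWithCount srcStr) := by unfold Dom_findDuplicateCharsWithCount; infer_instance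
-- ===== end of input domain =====

-- B replaces A's single-pass incremental duplicate bookkeeping (list membership scans plus a
-- running count dict) by a count-everything-then-filter two-pass structure; equivalence of the
-- returned dict (as an insertion-ordered association list) is proved for every string.

-- ===== PORT A =====
-- one iteration of A's for-loop; state st = (dupCharsList, charsRead, charsReadDict)
def dupStepA (st : List Char × List Char × PySem.Dict Char Int) (c : Char) :
    List Char × List Char × PySem.Dict Char Int :=
  if c ∈ st.2.1 ∧ st.2.1.length > 0 then
    if c ∉ st.1 then (st.1 ++ [c], st.2.1, st.2.2.insert c 2)
    else (st.1, st.2.1, st.2.2.insert c (st.2.2.getD c 0 + 1))  -- d[c] exists here (c ∈ dupCharsList)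
  else (st.1, st.2.1 ++ [c], st.2.2)

def findDuplicateCharsWithCount (srcStr : String) : List (String × Int) :=
  let st := srcStr.toList.foldl dupStepA ([], [], PySem.Dict.empty)
  -- Python dict keys are 1-character strings: render Char keys as String
  st.2.2.items.map (fun p => (String.ofList [p.1], p.2))

-- ===== PORT B =====
-- one iteration of B's second pass; state st = (result, seen); counts = the full frequency table
def dupStepB (counts : PySem.Dict Char Int) (st : PySem.Dict Char Int × PySem.Set Char)
    (c : Char) : PySem.Dict Char Int × PySem.Set Char :=
  if c ∈ st.2 then (st.1.insert c (counts.getD c 0), st.2)  -- counts[c] exists (c occurred before)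
  else (st.1, PySem.Set.add st.2 c)

def findDuplicateCharsWithCount_alt (srcStr : String) : List (String × Int) :=
  let counts := srcStr.toList.foldl (fun d c => d.insert c (d.getD c 0 + 1)) PySem.Dict.empty
  let st := srcStr.toList.foldl (dupStepB counts) (PySem.Dict.empty, PySem.Set.empty)
  st.1.items.map (fun p => (String.ofList [p.1], p.2))

-- ===== PRECONDITION & SPEC =====
def Spec_findDuplicateCharsWithCount (srcStr : String) (out : List (String × Int)) : Prop := out = findDuplicateCharsWithCount_alt srcStr
instance (srcStr : String) (out : List (String × Int)) : Decidable (Spec_findDuplicateCharsWithCount srcStr out) := by unfold Spec_findDuplicateCharsWithCount; infer_instance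

-- ===== CLAIM (what is proved, stated in full; the proofs are below) =====
def Claim_equal_findDuplicateCharsWithCount : Prop := ∀ (srcStr : String), Dom_findDuplicateCharsWithCount srcStr → Spec_findDuplicateCharsWithCount srcStr (findDuplicateCharsWithCount srcStr)

-- ===== LEMMAS AND PROOFS =====


theorem cnt_single_ne (x c : Char) (h : x ≠ c) : List.count x [c] = 0 := by
  rw [List.count_eq_zero]; simp [h]

theorem cnt_single_eq (c : Char) : List.count c [c] = 1 := by simp

-- joint loop invariant after both loops have consumed the prefix p of the full string l
def DupInv (l p : List Char) (sA : List Char × List Char × PySem.Dict Char Int)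
    (sB : PySem.Dict Char Int × PySem.Set Char) : Prop :=
  sA.2.1 = PySem.Set.ofList p ∧
  sB.2 = PySem.Set.ofList p ∧
  sA.2.2.keys = sA.1 ∧
  sB.1.keys = sA.1 ∧
  sA.1.Nodup ∧
  (∀ c, c ∈ sA.1 ↔ 2 ≤ p.count c) ∧
  (∀ c ∈ sA.1, sA.2.2.getD c 0 = (p.count c : Int)) ∧
  (∀ c ∈ sA.1, sB.1.getD c 0 = (l.count c : Int))

theorem dupInv_step (l p : List Char) (c : Char) (sA : List Char × List Char × PySem.Dict Char Int)
    (sB : PySem.Dict Char Int × PySem.Set Char) (h : DupInv l p sA sB) :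
    DupInv l (p ++ [c]) (dupStepA sA c)
      (dupStepB (l.foldl (fun d x => d.insert x (d.getD x 0 + 1)) PySem.Dict.empty) sB c) := by
  obtain ⟨dup, read, d⟩ := sA
  obtain ⟨res, seen⟩ := sB
  obtain ⟨hread, hseen, hkA, hkB, hnd, hmem, hvA, hvB⟩ := h
  simp only at hread hseen hkA hkB hnd hmem hvA hvB
  have hcounts : ∀ x : Char,
      (l.foldl (fun d x => d.insert x (d.getD x 0 + 1)) PySem.Dict.empty).getD x 0
        = (l.count x : Int) := by
    intro x
    simp [PySem.Dict.getD_foldl_insert_add_one]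
  by_cases hc : c ∈ p
  · -- c seen before: A takes the duplicate branch, B inserts
    have hApos : c ∈ read ∧ read.length > 0 := by
      have h1 : c ∈ read := by rw [hread]; exact (PySem.Set.mem_ofList p c).2 hc
      exact ⟨h1, List.length_pos_of_mem h1⟩
    have hBpos : c ∈ seen := by rw [hseen]; exact (PySem.Set.mem_ofList p c).2 hc
    have hcount1 : 1 ≤ p.count c := List.one_le_count_iff.2 hc
    have hofp : PySem.Set.ofList (p ++ [c]) = PySem.Set.ofList p := by
      rw [PySem.Set.ofList_append_singleton,
        PySem.Set.add_of_mem ((PySem.Set.mem_ofList p c).2 hc)]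
    by_cases hd : c ∈ dup
    · -- third-or-later occurrence
      have hcontA : d.contains c = true := (PySem.Dict.contains_iff_mem_keys d c).2 (hkA ▸ hd)
      have hcontB : res.contains c = true := (PySem.Dict.contains_iff_mem_keys res c).2 (hkB ▸ hd)
      simp only [DupInv, dupStepA, dupStepB, if_pos hApos, if_neg (not_not.2 hd), if_pos hBpos]
      refine ⟨by rw [hofp]; exact hread, by rw [hofp]; exact hseen, ?_, ?_, hnd, ?_, ?_, ?_⟩
      · rw [PySem.Dict.keys_insert_of_contains d _ hcontA]; exact hkA
      · rw [PySem.Dict.keys_insert_of_contains res _ hcontB]; exact hkB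
      · intro x
        rw [hmem x, List.count_append]
        by_cases hx : x = c
        · have h1 : List.count x [c] = 1 := by rw [hx]; exact cnt_single_eq c
          have h2 := (hmem c).1 hd
          rw [hx]
          omega
        · have h1 : List.count x [c] = 0 := cnt_single_ne x c hx
          omega
      · intro x hx
        rw [PySem.Dict.getD_insert, List.count_append]
        by_cases hxc : x = c
        · rw [if_pos hxc, hxc, cnt_single_eq c, hvA c hd]
          push_cast; ring
        · rw [if_neg hxc, cnt_single_ne x c hxc, hvA x hx]
          simp
      · intro x hx
        rw [PySem.Dict.getD_insert]
        by_cases hxc : x = c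
        · rw [if_pos hxc, hxc, hcounts]
        · rw [if_neg hxc]; exact hvB x hx
    · -- exactly the second occurrence of c
      have hcount_eq : p.count c = 1 := by
        have h2 := (hmem c).not.1 hd
        omega
      have hcontA : d.contains c = false :=
        Bool.eq_false_iff.2 fun h1 => hd (hkA ▸ (PySem.Dict.contains_iff_mem_keys d c).1 h1)
      have hcontB : res.contains c = false :=
        Bool.eq_false_iff.2 fun h1 => hd (hkB ▸ (PySem.Dict.contains_iff_mem_keys res c).1 h1)
      simp only [DupInv, dupStepA, dupStepB, if_pos hApos, if_pos hd, if_pos hBpos]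
      refine ⟨by rw [hofp]; exact hread, by rw [hofp]; exact hseen, ?_, ?_, ?_, ?_, ?_, ?_⟩
      · rw [PySem.Dict.keys_insert_of_not_contains d _ hcontA, hkA]
      · rw [PySem.Dict.keys_insert_of_not_contains res _ hcontB, hkB]
      · exact List.Nodup.append hnd (List.nodup_singleton c) (by simpa using hd)
      · intro x
        rw [List.mem_append, List.mem_singleton, hmem x, List.count_append]
        by_cases hx : x = c
        · rw [hx, cnt_single_eq c, hcount_eq]
          simp
        · rw [cnt_single_ne x c hx]
          simp [hx]
      · intro x hx
        rw [PySem.Dict.getD_insert, List.count_append]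
        by_cases hxc : x = c
        · rw [if_pos hxc, hxc, hcount_eq, cnt_single_eq c]
          norm_num
        · rw [if_neg hxc]
          rcases List.mem_append.1 hx with h1 | h1
          · rw [cnt_single_ne x c hxc, hvA x h1]
            norm_num
          · exact absurd (List.mem_singleton.1 h1) hxc
      · intro x hx
        rw [PySem.Dict.getD_insert]
        by_cases hxc : x = c
        · rw [if_pos hxc, hxc, hcounts]
        · rw [if_neg hxc]
          rcases List.mem_append.1 hx with h1 | h1
          · exact hvB x h1
          · exact absurd (List.mem_singleton.1 h1) hxc
  · -- first occurrence of c: both loops only record c as seen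
    have hmemread : c ∉ read := by
      rw [hread]; exact fun h1 => hc ((PySem.Set.mem_ofList p c).1 h1)
    have hApos : ¬(c ∈ read ∧ read.length > 0) := fun h1 => hmemread h1.1
    have hBpos : c ∉ seen := by
      rw [hseen]; exact fun h1 => hc ((PySem.Set.mem_ofList p c).1 h1)
    simp only [DupInv, dupStepA, dupStepB, if_neg hApos, if_neg hBpos]
    refine ⟨?_, ?_, hkA, hkB, hnd, ?_, ?_, hvB⟩
    · rw [PySem.Set.ofList_append_singleton, ← hread, PySem.Set.add_of_not_mem hmemread]
    · rw [PySem.Set.ofList_append_singleton, ← hseen,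
        PySem.Set.add_of_not_mem (hseen ▸ hBpos), hseen]
    · intro x
      rw [hmem x, List.count_append]
      by_cases hx : x = c
      · have h0 : p.count x = 0 := by rw [hx]; exact List.count_eq_zero.2 hc
        have h1 : List.count x [c] = 1 := by rw [hx]; exact cnt_single_eq c
        omega
      · have h0 : List.count x [c] = 0 := cnt_single_ne x c hx
        omega
    · intro x hx
      have hxc : x ≠ c := fun h1 => by
        have h0 : p.count x = 0 := by rw [h1]; exact List.count_eq_zero.2 hc
        have h2 := (hmem x).1 hx
        omega
      rw [List.count_append, cnt_single_ne x c hxc, hvA x hx]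
      norm_num

theorem dupInv_foldl (l rest p : List Char) (sA : List Char × List Char × PySem.Dict Char Int)
    (sB : PySem.Dict Char Int × PySem.Set Char) (h : DupInv l p sA sB) :
    DupInv l (p ++ rest) (rest.foldl dupStepA sA)
      (rest.foldl (dupStepB (l.foldl (fun d x => d.insert x (d.getD x 0 + 1)) PySem.Dict.empty)) sB) := by
  induction rest generalizing p sA sB with
  | nil => simpa using h
  | cons c cs ih =>
    have h2 := ih (p ++ [c]) _ _ (dupInv_step l p c sA sB h)
    simpa using h2

theorem findDuplicateCharsWithCount_eq (srcStr : String) :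
    findDuplicateCharsWithCount srcStr = findDuplicateCharsWithCount_alt srcStr := by
  set l := srcStr.toList with hl
  have hinit : DupInv l [] ([], [], PySem.Dict.empty) (PySem.Dict.empty, PySem.Set.empty) := by
    refine ⟨rfl, rfl, rfl, rfl, List.nodup_nil, ?_, ?_, ?_⟩ <;> simp
  have hinv := dupInv_foldl l l [] _ _ hinit
  rw [List.nil_append] at hinv
  obtain ⟨-, -, hkA, hkB, hnd, -, hvA, hvB⟩ := hinv
  unfold findDuplicateCharsWithCount findDuplicateCharsWithCount_alt
  simp only [← hl]
  have hitems :
      (l.foldl dupStepA ([], [], PySem.Dict.empty)).2.2.items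
        = (l.foldl (dupStepB (l.foldl (fun d x => d.insert x (d.getD x 0 + 1)) PySem.Dict.empty))
            (PySem.Dict.empty, PySem.Set.empty)).1.items := by
    rw [PySem.Dict.items_eq_map_keys _ (hkA ▸ hnd) 0,
        PySem.Dict.items_eq_map_keys _ (hkB ▸ hnd) 0, hkA, hkB]
    apply List.map_congr_left
    intro x hx
    rw [hvA x hx, hvB x hx]
  rw [hitems]

-- ===== VERDICT (by name: the statement is the Claim_ definition above) =====
theorem findDuplicateCharsWithCount_spec : Claim_equal_findDuplicateCharsWithCount := by
  intro srcStr _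
  exact findDuplicateCharsWithCount_eq srcStr
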